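-- pv_equiv track=rewrite | github.com/gongpha/pscp-psit-archive | kunlapat/midterm/Calculator.py | calculator_press
-- ===== SOURCE A (Python) =====
-- def calculator_press(end: int) -> int:
--     """Return the amount of key presses it takes to
--        add up all the number from one up to the given parameter"""
--     if end == 1:
--         return 1
--     else:
--         output = 0
--         for i in range(1, end+1):
--             output += len(str(i)) + 1
--         return output
-- ===== SOURCE B (Python) =====
-- def calculator_press(end: int) -> int:
--     """Return the amount of key presses it takes to
--        add up all the number from one up to the given parameter"""
--     if end == 1:
--         return 1
--     if end < 1:
--         return 0
--     # one '+' press per number, plus its digit count, summed per decade block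
--     total = end
--     d, lo = 1, 1
--     while lo <= end:
--         hi = min(end, 10 * lo - 1)
--         total += d * (hi - lo + 1)
--         d += 1
--         lo *= 10
--     return total
-- ===== Notes on version B (the rewrite author's own statement) =====
-- stated objective: faster
-- what changed: Replaces the per-number loop that sums each number's string length with a closed-form sum over decimal-length blocks, looping once per digit count.
import Mathlib
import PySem

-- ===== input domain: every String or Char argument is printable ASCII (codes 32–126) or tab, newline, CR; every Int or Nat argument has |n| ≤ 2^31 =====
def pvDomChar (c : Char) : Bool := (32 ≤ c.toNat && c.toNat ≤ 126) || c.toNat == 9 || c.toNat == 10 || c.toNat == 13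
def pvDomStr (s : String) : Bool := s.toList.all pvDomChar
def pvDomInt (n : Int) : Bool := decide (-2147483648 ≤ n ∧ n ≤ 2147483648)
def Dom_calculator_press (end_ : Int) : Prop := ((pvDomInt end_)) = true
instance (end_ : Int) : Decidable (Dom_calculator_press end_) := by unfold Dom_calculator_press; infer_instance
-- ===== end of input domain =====

-- B replaces A's per-number loop over range(1, end+1) by a closed-form sum
-- over decimal-length blocks (one iteration per digit count): faster.

-- ===== PORT A =====
def calculator_press (end_ : Int) : Int :=
  if end_ = 1 then 1
  else
    (PySem.List.pyRange 1 (end_ + 1)).foldl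
      (fun output i => output + (PySem.Str.len (PySem.Int.toStr i) + 1)) 0

-- ===== PORT B =====
-- While loop of Source B: lo runs over 1, 10, 100, …; the '0 < lo' conjunct is a
-- totality guard (lo starts at 1 and is only multiplied by 10).
def cpLoop (end_ : Int) (lo : Nat) (d total : Int) : Int :=
  if h : 0 < lo ∧ (lo : Int) ≤ end_ then
    cpLoop end_ (10 * lo) (d + 1) (total + d * (min end_ (10 * (lo : Int) - 1) - (lo : Int) + 1))
  else total
termination_by (end_ + 1 - lo).toNat
decreasing_by
  obtain ⟨h1, h2⟩ := h
  have : (lo : Int) < (10 * lo : Nat) := by push_cast; omega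
  omega

def calculator_press_alt (end_ : Int) : Int :=
  if end_ = 1 then 1
  else if end_ < 1 then 0
  else cpLoop end_ 1 1 end_

-- ===== PRECONDITION & SPEC =====
def Spec_calculator_press (end_ : Int) (out : Int) : Prop := out = calculator_press_alt end_
instance (end_ : Int) (out : Int) : Decidable (Spec_calculator_press end_ out) := by unfold Spec_calculator_press; infer_instance

-- ===== CLAIM (what is proved, stated in full; the proofs are below) =====
def Claim_equal_calculator_press : Prop := ∀ (end_ : Int), Dom_calculator_press end_ → Spec_calculator_press end_ (calculator_press end_)

-- ===== LEMMAS AND PROOFS =====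

-- Sum of decimal digit counts of 1..n.
def DS : Nat → Int
  | 0 => 0
  | n + 1 => DS n + ((Nat.toDigits 10 (n + 1)).length : Int)

-- Exact decimal length of a number in [10^e, 10^(e+1)).
theorem toDigits_length_exact (e m : Nat) (h1 : 10 ^ e ≤ m) (h2 : m < 10 ^ (e + 1)) :
    (Nat.toDigits 10 m).length = e + 1 := by
  have hub : (Nat.toDigits 10 m).length ≤ e + 1 :=
    (Nat.length_toDigits_le_iff (by norm_num) (by omega)).mpr h2
  have hlb : e + 1 ≤ (Nat.toDigits 10 m).length := by
    rcases Nat.eq_zero_or_pos e with he | he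
    · subst he; exact Nat.length_toDigits_pos
    · by_contra hc
      have : m < 10 ^ e := (Nat.length_toDigits_le_iff (by norm_num) he).mp (by omega)
      omega
  omega

-- DS is linear on a decade block.
theorem DS_block (e : Nat) : ∀ (k a : Nat), 10 ^ e ≤ a + 1 → a + k < 10 ^ (e + 1) →
    DS (a + k) = DS a + ((e : Int) + 1) * k := by
  intro k
  induction k with
  | zero => intro a _ _; simp
  | succ k ih =>
    intro a h1 h2
    have hk : a + (k + 1) = (a + k) + 1 := by omega
    rw [hk]
    show DS (a + k) + ((Nat.toDigits 10 ((a + k) + 1)).length : Int) = _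
    rw [ih a h1 (by omega), toDigits_length_exact e ((a + k) + 1) (by omega) (by omega)]
    push_cast
    ring

-- length of str(i) for nonnegative i, as Nat.toDigits.
theorem strlen_natCast (n : Nat) :
    PySem.Str.len (PySem.Int.toStr (n : Int)) = ((Nat.toDigits 10 n).length : Int) := by
  rw [PySem.Str.len_eq, PySem.Int.toList_toStr]
  simp [PySem.Int.toChars]
  rw [if_neg (by omega : ¬ ((n : Int) < 0))]

-- A's loop computes m + DS m.
theorem loopA_eq (m : Nat) (t : Int) :
    (PySem.List.pyRange 1 ((m : Int) + 1)).foldl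
      (fun output i => output + (PySem.Str.len (PySem.Int.toStr i) + 1)) t
    = t + m + DS m := by
  induction m generalizing t with
  | zero =>
    rw [PySem.List.pyRange_one_eq_nil (by norm_num)]
    simp [DS]
  | succ m ih =>
    rw [show ((m + 1 : Nat) : Int) + 1 = ((m : Int) + 1) + 1 by push_cast; ring]
    rw [PySem.List.pyRange_one_append 1 ((m : Int) + 1) (((m : Int) + 1) + 1) (by omega) (by omega)]
    rw [List.foldl_append, ih]
    rw [PySem.List.pyRange_one_cons (by omega), PySem.List.pyRange_one_eq_nil (by omega)]
    show t + ↑m + DS m + (PySem.Str.len (PySem.Int.toStr ((m : Int) + 1)) + 1) = _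
    rw [show ((m : Int) + 1) = ((m + 1 : Nat) : Int) by push_cast; ring, strlen_natCast]
    show _ = t + ((m + 1 : Nat) : Int) + (DS m + ((Nat.toDigits 10 (m + 1)).length : Int))
    push_cast
    ring

-- B's loop invariant: at lo = 10^e, d = e+1 it adds the digit sum of the
-- numbers in (10^e - 1, end_].
theorem cpLoop_eq (n : Int) : ∀ (k e : Nat) (t : Int), n < 10 ^ (e + k) →
    cpLoop n (10 ^ e) ((e : Int) + 1) t
      = t + (DS n.toNat - DS (min n.toNat (10 ^ e - 1))) := by
  intro k
  induction k with
  | zero =>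
    intro e t hlt
    rw [Nat.add_zero] at hlt
    have hp : 0 < (10 ^ e : Nat) := Nat.pow_pos (by norm_num)
    have hc : ((10 ^ e : Nat) : Int) = (10 : Int) ^ e := by push_cast; ring
    rw [cpLoop, dif_neg (by omega : ¬ (0 < (10 ^ e : Nat) ∧ ((10 ^ e : Nat) : Int) ≤ n))]
    have : min n.toNat (10 ^ e - 1) = n.toNat := by omega
    rw [this]
    ring
  | succ k ih =>
    intro e t hlt
    have hp : 0 < (10 ^ e : Nat) := Nat.pow_pos (by norm_num)
    have hc : ((10 ^ e : Nat) : Int) = (10 : Int) ^ e := by push_cast; ring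
    rw [cpLoop]
    by_cases hle : ((10 ^ e : Nat) : Int) ≤ n
    · rw [dif_pos ⟨hp, hle⟩]
      rw [show (10 : Nat) * 10 ^ e = 10 ^ (e + 1) by ring]
      rw [show e + (k + 1) = (e + 1) + k by omega] at hlt
      have hih := ih (e + 1)
        (t + ((e : Int) + 1) * (min n (10 * ((10 ^ e : Nat) : Int) - 1) - ((10 ^ e : Nat) : Int) + 1)) hlt
      rw [show ((e + 1 : Nat) : Int) + 1 = ((e : Int) + 1) + 1 by push_cast; ring] at hih
      rw [hih]
      have hcastN : ((10 ^ (e + 1) : Nat) : Int) = 10 * ((10 ^ e : Nat) : Int) := by push_cast; ring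
      have hNat : (10 ^ (e + 1) : Nat) = 10 * 10 ^ e := by ring
      have hne : (10 ^ e : Nat) ≤ n.toNat := by omega
      set a : Nat := 10 ^ e - 1 with ha
      set b : Nat := min n.toNat (10 ^ (e + 1) - 1) with hb
      have hab : a ≤ b := by omega
      have hblock : DS b = DS a + ((e : Int) + 1) * ((b - a : Nat) : Int) := by
        have hres := DS_block e (b - a) a (by omega) (by omega)
        rw [show a + (b - a) = b by omega] at hres
        exact hres
      have hminn : min n.toNat a = a := by omega
      have hfaceq : min n (10 * ((10 ^ e : Nat) : Int) - 1) - ((10 ^ e : Nat) : Int) + 1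
          = ((b - a : Nat) : Int) := by omega
      rw [hminn, hfaceq, hblock]
      omega
    · rw [dif_neg (by omega : ¬ (0 < (10 ^ e : Nat) ∧ ((10 ^ e : Nat) : Int) ≤ n))]
      have : min n.toNat (10 ^ e - 1) = n.toNat := by omega
      rw [this]
      ring

-- ===== VERDICT (by name: the statement is the Claim_ definition above) =====
theorem calculator_press_spec : Claim_equal_calculator_press := by
  intro end_ _
  unfold Spec_calculator_press calculator_press calculator_press_alt
  by_cases h1 : end_ = 1
  · simp [h1]
  · rw [if_neg h1, if_neg h1]
    by_cases h2 : end_ < 1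
    · rw [if_pos h2, PySem.List.pyRange_one_eq_nil (by omega)]
      rfl
    · rw [if_neg h2]
      have hm : end_ = ((end_.toNat : Nat) : Int) := by omega
      have hA := loopA_eq end_.toNat 0
      rw [← hm] at hA
      rw [hA]
      have hk : end_ < 10 ^ (0 + (end_.toNat + 1)) := by
        rw [Nat.zero_add]
        have h1 : end_.toNat < 10 ^ (end_.toNat + 1) :=
          lt_of_lt_of_le (Nat.lt_pow_self (by norm_num)) (Nat.pow_le_pow_right (by norm_num) (by omega))
        have h2 : ((10 ^ (end_.toNat + 1) : Nat) : Int) = (10 : Int) ^ (end_.toNat + 1) := by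
          push_cast; ring
        omega
      have hB := cpLoop_eq end_ (end_.toNat + 1) 0 end_ hk
      rw [pow_zero] at hB
      rw [show ((0 : Nat) : Int) + 1 = 1 by norm_num] at hB
      rw [hB]
      have : min end_.toNat (1 - 1) = 0 := by omega
      rw [this]
      show 0 + end_ + DS end_.toNat = end_ + (DS end_.toNat - DS 0)
      show 0 + end_ + DS end_.toNat = end_ + (DS end_.toNat - 0)
      ring
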